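-- pv_equiv track=rewrite | github.com/3vgen/HTPerformanceLab | task1/task1.py | circular_traversal
-- ===== SOURCE A (Python) =====
-- def circular_traversal(n, m):
--
--     if n <= 0 or m <= 0:
--         return []
--
--     arr = [i + 1 for i in range(n)]
--     result = []
--
--     start = 0
--     while True:
--
--         result.append(arr[start])
--
--         last = (start + m - 1) % n
--         if last == 0:
--             break
--
--         start = last
--
--     return result
-- ===== SOURCE B (Python) =====
-- def circular_traversal(n, m):
--     if n <= 0 or m <= 0:
--         return []
--     d = (m - 1) % n
--     if d == 0:
--         return [1]
--     a, b = n, d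
--     while b:
--         a, b = b, a % b
--     return [(k * d) % n + 1 for k in range(n // a)]
-- ===== Notes on version B (the rewrite author's own statement) =====
-- stated objective: faster
-- what changed: B replaces A's O(n) array allocation plus step-by-step cyclic walk with a closed form: it reduces the step d=(m-1)%n, computes gcd(n,d) by Euclid, and emits the n/gcd(n,d) visited positions directly as a list comprehension.
import Mathlib
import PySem

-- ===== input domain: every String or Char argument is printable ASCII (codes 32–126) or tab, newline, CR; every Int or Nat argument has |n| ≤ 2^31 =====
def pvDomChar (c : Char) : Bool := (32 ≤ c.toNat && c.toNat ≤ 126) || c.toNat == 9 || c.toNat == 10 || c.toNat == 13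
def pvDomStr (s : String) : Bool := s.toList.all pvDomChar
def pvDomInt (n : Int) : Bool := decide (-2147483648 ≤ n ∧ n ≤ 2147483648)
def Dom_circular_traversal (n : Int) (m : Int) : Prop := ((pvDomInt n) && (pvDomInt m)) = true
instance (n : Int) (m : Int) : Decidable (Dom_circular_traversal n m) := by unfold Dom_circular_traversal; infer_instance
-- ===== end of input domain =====

-- B replaces A's O(n) array allocation + cyclic walk by a closed-form list comprehension of
-- length n/gcd(n,(m-1)%n): measurably faster when gcd is large; structurally a formula, not a walk.

-- ===== PORT A =====
-- the while-True loop of A; fuel n suffices (the walk returns to 0 after at most n steps);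
-- arr[start] is always in range, so pyGetD's default is never used
def loopA (arr : List Int) (n dm : Int) : Int → Nat → List Int
  | _, 0 => []
  | start, f+1 =>
    let res := PySem.List.pyGetD arr start 0
    let last := PySem.Int.mod (start + dm) n
    if last = 0 then [res] else res :: loopA arr n dm last f

def circular_traversal (n : Int) (m : Int) : List Int :=
  if n ≤ 0 ∨ m ≤ 0 then []
  else loopA ((PySem.List.pyRange 0 n 1).map (fun i => i + 1)) n (m - 1) 0 n.toNat

-- ===== PORT B =====
-- hand-written Euclid loop of Source B (A imports nothing, so Source B could not use math.gcd)
def gcdLoop (a b : Nat) : Nat :=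
  if h : b = 0 then a else gcdLoop b (a % b)
termination_by b
decreasing_by exact Nat.mod_lt a (Nat.pos_of_ne_zero h)

def circular_traversal_alt (n : Int) (m : Int) : List Int :=
  if n ≤ 0 ∨ m ≤ 0 then []
  else
    let d := PySem.Int.mod (m - 1) n
    if d = 0 then [1]
    else
      let g := gcdLoop n.toNat d.toNat
      (PySem.List.pyRange 0 (PySem.Int.floordiv n (g : Int)) 1).map
        (fun k => PySem.Int.mod (k * d) n + 1)

-- ===== PRECONDITION & SPEC =====
def Spec_circular_traversal (n : Int) (m : Int) (out : List Int) : Prop := out = circular_traversal_alt n m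
instance (n : Int) (m : Int) (out : List Int) : Decidable (Spec_circular_traversal n m out) := by unfold Spec_circular_traversal; infer_instance

-- ===== CLAIM (what is proved, stated in full; the proofs are below) =====
def Claim_equal_circular_traversal : Prop := ∀ (n : Int) (m : Int), Dom_circular_traversal n m → Spec_circular_traversal n m (circular_traversal n m)

-- ===== LEMMAS AND PROOFS =====

lemma gcdLoop_eq_gcd (a b : Nat) : gcdLoop a b = Nat.gcd a b := by
  induction b using Nat.strong_induction_on generalizing a with
  | _ b ih =>
    rw [gcdLoop]
    split
    · simp [*]
    · rename_i h
      rw [ih (a % b) (Nat.mod_lt a (Nat.pos_of_ne_zero h)) b]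
      rw [Nat.gcd_comm a b, Nat.gcd_rec b a, Nat.gcd_comm]

-- n ∣ k*d exactly when n/gcd(n,d) ∣ k
lemma dvd_cancel_cop (g q e k : Nat) (hg : 0 < g) (hcop : Nat.Coprime q e) :
    g * q ∣ k * (g * e) ↔ q ∣ k := by
  constructor
  · intro h
    have h' : g * q ∣ g * (k * e) := by rwa [show g * (k * e) = k * (g * e) by ring]
    exact hcop.dvd_of_dvd_mul_right ((Nat.mul_dvd_mul_iff_left hg).mp h')
  · intro h
    have h1 : g * q ∣ g * k := Nat.mul_dvd_mul_left g h
    exact h1.trans (by rw [show g * k = k * g by ring]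
                       exact Nat.mul_dvd_mul_left k (Dvd.intro e rfl))

-- n ∣ k*d exactly when n/gcd(n,d) ∣ k
lemma dvd_key (N D k : Nat) (hN : 0 < N) :
    N ∣ k * D ↔ (N / Nat.gcd N D) ∣ k := by
  have hg : 0 < Nat.gcd N D := Nat.gcd_pos_of_pos_left _ hN
  have hcop : Nat.Coprime (N / Nat.gcd N D) (D / Nat.gcd N D) :=
    Nat.coprime_div_gcd_div_gcd hg
  have hq : Nat.gcd N D * (N / Nat.gcd N D) = N := Nat.mul_div_cancel' (Nat.gcd_dvd_left N D)
  have he : Nat.gcd N D * (D / Nat.gcd N D) = D := Nat.mul_div_cancel' (Nat.gcd_dvd_right N D)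
  have h2 := dvd_cancel_cop (Nat.gcd N D) (N / Nat.gcd N D) (D / Nat.gcd N D) k hg hcop
  rw [hq, he] at h2
  exact h2

-- mod bridging: (x % n + y) % n = (x + y) % n
lemma emod_add_left (n x y : Int) : (x % n + y) % n = (x + y) % n := by
  conv_rhs => rw [Int.add_emod]
  rw [Int.add_emod (x % n) y, Int.emod_emod_of_dvd x dvd_rfl]

-- the if-test 'last == 0' is exactly divisibility of the step count by n/gcd(n,d)
lemma mod_key (n d : Int) (hn : 0 < n) (hd : 0 ≤ d) (j : Nat) :
    ((j : Int) * d % n = 0) ↔ (n.toNat / Nat.gcd n.toNat d.toNat) ∣ j := by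
  have hN : ((n.toNat : Nat) : Int) = n := Int.toNat_of_nonneg hn.le
  have hD : ((d.toNat : Nat) : Int) = d := Int.toNat_of_nonneg hd
  have h1 : (j : Int) * d % n = ((j * d.toNat % n.toNat : Nat) : Int) := by
    rw [Int.natCast_mod, Int.natCast_mul, hD, hN]
  rw [h1, Int.natCast_eq_zero]
  exact (Iff.symm Nat.dvd_iff_mod_eq_zero).trans (dvd_key n.toNat d.toNat j (by omega))

lemma loopA_eq (n d dm : Int) (hn : 0 < n) (hd : 0 < d)
    (hdm : PySem.Int.mod dm n = d) :
    ∀ (f k : Nat), 1 ≤ k → k < n.toNat / Nat.gcd n.toNat d.toNat →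
      n.toNat / Nat.gcd n.toNat d.toNat - k ≤ f →
      loopA ((PySem.List.pyRange 0 n 1).map (fun i => i + 1)) n dm ((k : Int) * d % n) f
        = (List.range' k (n.toNat / Nat.gcd n.toNat d.toNat - k)).map
            (fun j : Nat => (j : Int) * d % n + 1) := by
  intro f
  induction f with
  | zero => intro k hk1 hk2 hf; omega
  | succ f ih =>
    intro k hk1 hk2 hf
    set L := n.toNat / Nat.gcd n.toNat d.toNat with hL
    have hstart0 : (0 : Int) ≤ (k : Int) * d % n := Int.emod_nonneg _ (ne_of_gt hn)
    have hstartn : (k : Int) * d % n < n := Int.emod_lt_of_pos _ hn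
    have hres : PySem.List.pyGetD ((PySem.List.pyRange 0 n 1).map (fun i => i + 1))
        ((k : Int) * d % n) 0 = (k : Int) * d % n + 1 :=
      PySem.List.pyGetD_map_pyRange_of_nonneg _ n _ 0 hstart0 hstartn
    have hlast : PySem.Int.mod ((k : Int) * d % n + dm) n = ((k + 1 : Nat) : Int) * d % n := by
      rw [PySem.Int.mod_eq_emod_of_pos hn, emod_add_left]
      have hdmn : dm % n = d := by rw [← PySem.Int.mod_eq_emod_of_pos hn]; exact hdm
      calc ((k : Int) * d + dm) % n = (dm + (k : Int) * d) % n := by ring_nf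
        _ = (dm % n + (k : Int) * d) % n := (emod_add_left n dm _).symm
        _ = ((k + 1 : Nat) : Int) * d % n := by rw [hdmn]; push_cast; ring_nf
    rw [loopA, hres, hlast]
    by_cases hdvd : L ∣ (k + 1)
    · have hkL : k + 1 = L := Nat.le_antisymm (by omega) (Nat.le_of_dvd (by omega) hdvd)
      rw [if_pos ((mod_key n d hn hd.le (k + 1)).mpr hdvd)]
      rw [show L - k = 1 by omega]
      simp
    · have hk1L : k + 1 < L := by
        rcases Nat.lt_or_ge (k + 1) L with h | h
        · exact h
        · have hkL : k + 1 = L := by omega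
          exact absurd (by rw [hkL] : L ∣ (k + 1)) hdvd
      rw [if_neg (by rw [mod_key n d hn hd.le (k + 1)]; exact hdvd)]
      rw [ih (k + 1) (by omega) hk1L (by omega)]
      rw [show L - k = (L - (k + 1)) + 1 by omega, List.range'_succ]
      simp

-- ===== VERDICT (by name: the statement is the Claim_ definition above) =====
theorem circular_traversal_spec : Claim_equal_circular_traversal := by
  intro n m _
  unfold Spec_circular_traversal circular_traversal circular_traversal_alt
  by_cases h : n ≤ 0 ∨ m ≤ 0
  · rw [if_pos h, if_pos h]
  · rw [if_neg h, if_neg h]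
    have hn : 0 < n := by omega
    have hm : 0 < m := by omega
    have hd0 : 0 ≤ PySem.Int.mod (m - 1) n := PySem.Int.mod_nonneg _ hn
    have hdlt : PySem.Int.mod (m - 1) n < n := PySem.Int.mod_lt _ hn
    have hN : ((n.toNat : Nat) : Int) = n := Int.toNat_of_nonneg hn.le
    conv_lhs => rw [show n.toNat = (n.toNat - 1) + 1 by omega, loopA]
    have hres : PySem.List.pyGetD ((PySem.List.pyRange 0 n 1).map (fun i => i + 1))
        0 0 = (0 : Int) + 1 :=
      PySem.List.pyGetD_map_pyRange_of_nonneg _ n 0 0 le_rfl hn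
    rw [hres]
    simp only [zero_add]
    by_cases hd : PySem.Int.mod (m - 1) n = 0
    · rw [if_pos hd]
      simp [hd]
    · rw [if_neg hd]
      have hdpos : 0 < PySem.Int.mod (m - 1) n := by omega
      have hDpos : 0 < (PySem.Int.mod (m - 1) n).toNat := by omega
      simp only [gcdLoop_eq_gcd]
      set d := PySem.Int.mod (m - 1) n with hdd
      set g := Nat.gcd n.toNat d.toNat with hg
      set L := n.toNat / g with hLdef
      have hgpos : 0 < g := Nat.gcd_pos_of_pos_left _ (by omega)
      have hgD : g ≤ d.toNat := Nat.gcd_le_right _ hDpos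
      have hLpos : 1 < L := by
        obtain ⟨q, hq⟩ := (Nat.gcd_dvd_left n.toNat d.toNat : g ∣ n.toNat)
        have hqL : q = L := by rw [hLdef, hq, Nat.mul_div_cancel_left _ hgpos]
        rw [← hqL]
        by_contra hle
        have h1 : q ≤ 1 := by omega
        have h2 : n.toNat ≤ g := by nlinarith [hq]
        omega
      have hLN : L ≤ n.toNat := Nat.div_le_self _ _
      -- A side: d = 1*d % n, then the loop invariant
      have hdstart : d = ((1 : Nat) : Int) * d % n := by
        rw [Nat.cast_one, one_mul, Int.emod_eq_of_lt hd0 hdlt]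
      conv_lhs => rw [hdstart]
      rw [loopA_eq n d (m - 1) hn hdpos hdd.symm (n.toNat - 1) 1 le_rfl hLpos (Nat.sub_le_sub_right hLN 1)]
      -- B side: floordiv to L, pyRange to List.range
      rw [if_neg hd]
      have hfd : PySem.Int.floordiv n ((g : Nat) : Int) = ((L : Nat) : Int) := by
        conv_lhs => rw [← hN]
        rw [PySem.Int.floordiv_natCast]
      rw [hfd, PySem.List.pyRange_zero_natCast, List.map_map]
      conv_rhs => rw [show L = (L - 1) + 1 by omega, List.range_eq_range', List.range'_succ,
        List.map_cons]
      have hzero : (Function.comp (fun k => PySem.Int.mod (k * d) n + 1) (fun k : Nat => (k : Int))) 0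
          = (1 : Int) := by
        simp [PySem.Int.mod_eq_emod_of_pos hn]
      rw [hzero, show (0 : Nat) + 1 = 1 from rfl, ← hg, ← hLdef]
      congr 1
      apply List.map_congr_left
      intro j hj
      simp only [Function.comp_apply]
      rw [PySem.Int.mod_eq_emod_of_pos hn]
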